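-- pv_equiv track=rewrite | github.com/uf-icbr-bioinformatics/FOLD | fengcUtils.py | findCandidatePositions
-- ===== SOURCE A (Python) =====
-- def findCandidatePositions(positions, howmany, start, direction):
--     """Return `howmany' positions from the list of positions starting at `start' in direction `direction'
-- (1 = left to right, -1 = right to left)."""
--     if not positions:
--         return []
--
--     i = 0
--     # Find first position after `start'
--     for i, p_i in enumerate(positions):
--         if p_i >= start:
--             break
--     if direction == 1:
--         return positions[i:i+howmany]
--     # else:
--     p = max(i-howmany, 0)
--     return positions[p:i]
-- ===== SOURCE B (Python) =====
-- def findCandidatePositions(positions, howmany, start, direction):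
--     """Return `howmany' positions from the list of positions starting at `start' in direction `direction'
-- (1 = left to right, -1 = right to left)."""
--     if direction == 1:
--         taken = []
--         active = False
--         for p in positions:
--             if not active:
--                 active = p >= start
--             if active:
--                 if len(taken) >= howmany:
--                     break
--                 taken.append(p)
--         return taken
--     # right to left: keep a sliding window of the last `howmany' positions seen
--     # before the first position >= start
--     window = []
--     lo = 0
--     for p in positions:
--         if p >= start:
--             return window[lo:]
--         window.append(p)
--         if len(window) - lo > howmany:
--             lo += 1
--     return window[lo:]
-- ===== Notes on version B (the rewrite author's own statement) =====
-- stated objective: alternative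
-- what changed: B builds the answer directly in one streaming pass (collect howmany elements from the first match for direction 1; maintain a sliding window of the last howmany elements before the first match otherwise) instead of A's find-index-then-slice; Pre_ excludes negative howmany (outside the natural domain of a count) in the forward direction only, where A's value is a negative-slice wraparound artefact (backward, both return [] and stay inside Pre_).
-- intended difference: When positions is nonempty, howmany >= 1, every position is < start (and the two windows can actually differ: forward direction, or howmany >= len, or the trailing howmany+1 positions not all equal), A's leftover loop variable makes it slice around the LAST index -- e.g. [last element] for direction 1 though no position qualifies -- while B returns the candidates before the absent match ([] forward, the last howmany positions backward), which is the intended answer when no position reaches start. — e.g. on findCandidatePositions([3], 1, 5, 1): A returns [3], B returns []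
-- outside the precondition, e.g. on findCandidatePositions([1, 2, 3], -1, 0, 1): A returns [1, 2], B returns []
import Mathlib
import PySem

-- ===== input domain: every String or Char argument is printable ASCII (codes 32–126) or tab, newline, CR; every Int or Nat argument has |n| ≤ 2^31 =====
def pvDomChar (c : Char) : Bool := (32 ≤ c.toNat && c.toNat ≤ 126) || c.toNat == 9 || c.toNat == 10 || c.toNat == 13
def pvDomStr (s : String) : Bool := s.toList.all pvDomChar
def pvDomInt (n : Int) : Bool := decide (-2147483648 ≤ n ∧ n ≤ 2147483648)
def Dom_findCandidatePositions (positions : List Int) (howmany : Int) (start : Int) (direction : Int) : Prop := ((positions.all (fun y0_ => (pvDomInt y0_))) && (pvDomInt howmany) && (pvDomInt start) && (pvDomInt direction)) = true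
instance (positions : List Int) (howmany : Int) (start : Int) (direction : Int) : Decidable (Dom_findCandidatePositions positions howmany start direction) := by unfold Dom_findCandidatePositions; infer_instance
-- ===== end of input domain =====

-- B streams over the list once and builds the answer directly (collect-after-match forward,
-- sliding window backward) instead of A's find-index-then-slice; equal outside D_ below.

-- ===== PORT A =====
-- A's loop `for i, p_i in enumerate(positions): if p_i >= start: break`:
-- `cur` is the loop variable i (initially 0), returned on break or when the list is exhausted.
def fcpScan (start cur : Int) : List (Int × Int) → Int
  | [] => cur
  | (i, p) :: rest => if start ≤ p then i else fcpScan start i rest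

def findCandidatePositions (positions : List Int) (howmany : Int) (start : Int) (direction : Int) : List Int :=
  if positions = [] then []
  else
    let i := fcpScan start 0 (PySem.List.enumerate positions 0)
    if direction = 1 then
      PySem.List.slice positions (some i) (some (i + howmany))
    else
      let p := max (i - howmany) 0
      PySem.List.slice positions (some p) (some i)

-- ===== PORT B =====
-- forward pass: `if not active: active = p >= start; if active: break/append`
def fcpTake (start howmany : Int) (taken : List Int) (active : Bool) : List Int → List Int
  | [] => taken
  | p :: rest =>
    let active' := active || decide (start ≤ p)
    if active' then
      if howmany ≤ (taken.length : Int) then taken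
      else fcpTake start howmany (taken ++ [p]) active' rest
    else fcpTake start howmany taken active' rest

-- backward pass: sliding window `window` with live head index `lo` (a Python int that is
-- only ever 0, 1, 2, …, so it is carried as a Nat and cast for the int comparison)
def fcpWindow (start howmany : Int) (window : List Int) (lo : Nat) : List Int → List Int
  | [] => PySem.List.slice window (some (lo : Int)) none
  | p :: rest =>
    if start ≤ p then PySem.List.slice window (some (lo : Int)) none
    else
      let w := window ++ [p]
      let lo' := if howmany < (w.length : Int) - (lo : Int) then lo + 1 else lo
      fcpWindow start howmany w lo' rest

def findCandidatePositions_alt (positions : List Int) (howmany : Int) (start : Int) (direction : Int) : List Int :=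
  if direction = 1 then fcpTake start howmany [] false positions
  else fcpWindow start howmany [] 0 positions

-- ===== PRECONDITION & SPEC =====
-- Pre_ excludes negative `howmany` (a count, outside the natural domain) in the forward
-- direction only, where A's value is a Python negative-slice wraparound artefact,
-- e.g. A([1,2,3],-1,0,1) = [1,2]; backward, both programs return [] for negative howmany.
def Pre_findCandidatePositions (positions : List Int) (howmany : Int) (start : Int) (direction : Int) : Prop :=
  0 ≤ howmany ∨ direction ≠ 1
instance (positions : List Int) (howmany : Int) (start : Int) (direction : Int) : Decidable (Pre_findCandidatePositions positions howmany start direction) := by unfold Pre_findCandidatePositions; infer_instance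
def pvWitness_findCandidatePositions : List Int × Int × Int × Int := ([1, 3, 5], 2, 2, 1)

-- When positions is nonempty, howmany ≥ 1, every position is < start (and the two result
-- windows can actually differ: forward direction, or howmany ≥ length, or the trailing
-- howmany+1 positions not all equal), A's leftover loop variable makes it slice around the
-- LAST index — e.g. [last element] for direction 1 though no position qualifies — while B
-- returns the candidates before the absent match ([] forward, the last howmany positions
-- backward), the intended answer when no position reaches start.
def D_findCandidatePositions (positions : List Int) (howmany : Int) (start : Int) (direction : Int) : Prop :=
  positions ≠ [] ∧ 1 ≤ howmany ∧ (∀ p ∈ positions, p < start) ∧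
    (direction = 1 ∨ (positions.length : Int) ≤ howmany ∨
      ¬ (positions.drop (positions.length - 1 - howmany.toNat)).Pairwise (· = ·))
instance (positions : List Int) (howmany : Int) (start : Int) (direction : Int) : Decidable (D_findCandidatePositions positions howmany start direction) := by unfold D_findCandidatePositions; infer_instance

def Spec_findCandidatePositions (positions : List Int) (howmany : Int) (start : Int) (direction : Int) (out : List Int) : Prop := ¬ D_findCandidatePositions positions howmany start direction → out = findCandidatePositions_alt positions howmany start direction
instance (positions : List Int) (howmany : Int) (start : Int) (direction : Int) (out : List Int) : Decidable (Spec_findCandidatePositions positions howmany start direction out) := by unfold Spec_findCandidatePositions; infer_instance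

def pvDiffWitness_findCandidatePositions : List Int × Int × Int × Int := ([3], 1, 5, 1)
def pvDiffWitnessOut_findCandidatePositions : (List Int) × (List Int) := ([3], [])

-- ===== CLAIM (what is proved, stated in full; the proofs are below) =====
def Claim_unchanged_findCandidatePositions : Prop := ∀ (positions : List Int) (howmany : Int) (start : Int) (direction : Int), Dom_findCandidatePositions positions howmany start direction → Pre_findCandidatePositions positions howmany start direction → Spec_findCandidatePositions positions howmany start direction (findCandidatePositions positions howmany start direction)
def Claim_changed_findCandidatePositions : Prop := Dom_findCandidatePositions (pvDiffWitness_findCandidatePositions.1) (pvDiffWitness_findCandidatePositions.2.1) (pvDiffWitness_findCandidatePositions.2.2.1) (pvDiffWitness_findCandidatePositions.2.2.2) ∧ Pre_findCandidatePositions (pvDiffWitness_findCandidatePositions.1) (pvDiffWitness_findCandidatePositions.2.1) (pvDiffWitness_findCandidatePositions.2.2.1) (pvDiffWitness_findCandidatePositions.2.2.2) ∧ D_findCandidatePositions (pvDiffWitness_findCandidatePositions.1) (pvDiffWitness_findCandidatePositions.2.1) (pvDiffWitness_findCandidatePositions.2.2.1) (pvDiffWitness_findCandidatePositions.2.2.2)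 ∧ findCandidatePositions (pvDiffWitness_findCandidatePositions.1) (pvDiffWitness_findCandidatePositions.2.1) (pvDiffWitness_findCandidatePositions.2.2.1) (pvDiffWitness_findCandidatePositions.2.2.2) = pvDiffWitnessOut_findCandidatePositions.1 ∧ findCandidatePositions_alt (pvDiffWitness_findCandidatePositions.1) (pvDiffWitness_findCandidatePositions.2.1) (pvDiffWitness_findCandidatePositions.2.2.1) (pvDiffWitness_findCandidatePositions.2.2.2) = pvDiffWitnessOut_findCandidatePositions.2 ∧ pvDiffWitnessOut_findCandidatePositions.1 ≠ pvDiffWitnessOut_findCandidatePositions.2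
def Claim_exact_findCandidatePositions : Prop := ∀ (positions : List Int) (howmany : Int) (start : Int) (direction : Int), Dom_findCandidatePositions positions howmany start direction → Pre_findCandidatePositions positions howmany start direction → D_findCandidatePositions positions howmany start direction → findCandidatePositions positions howmany start direction ≠ findCandidatePositions_alt positions howmany start direction

-- ===== LEMMAS AND PROOFS =====

-- the last `k` elements of a list
def lastN (k : Nat) (xs : List Int) : List Int := xs.drop (xs.length - k)

theorem lastN_zero (xs : List Int) : lastN 0 xs = [] := by
  simp [lastN]

theorem lastN_cons (k : Nat) (x : Int) (xs : List Int) (h : k ≤ xs.length) :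
    lastN k (x :: xs) = lastN k xs := by
  unfold lastN
  have : xs.length + 1 - k = (xs.length - k) + 1 := by omega
  simp [this]

-- A's scan: first index whose element reaches start; last index when none does
theorem fcpScan_eq (start : Int) (l : List Int) (s cur : Int) (h : l ≠ []) :
    fcpScan start cur (PySem.List.enumerate l s) =
      if ∀ p ∈ l, p < start then s + l.length - 1
      else s + (l.takeWhile (fun p => decide (p < start))).length := by
  induction l generalizing s cur with
  | nil => exact absurd rfl h
  | cons x tl ih =>
    rw [PySem.List.enumerate_cons]
    by_cases hx : start ≤ x
    · have hall : ¬ ∀ p ∈ x :: tl, p < start := fun hc => absurd (hc x (by simp)) (by omega)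
      rw [if_neg hall, List.takeWhile_cons_of_neg (by simp; omega)]
      simp [fcpScan, hx]
    · have hxlt : x < start := by omega
      rw [List.takeWhile_cons_of_pos (by simpa using hxlt)]
      cases tl with
      | nil => simp [fcpScan, hx, PySem.List.enumerate_nil, hxlt]
      | cons y tl' =>
        have hrec := ih (s := s + 1) (cur := s) (by simp)
        simp only [fcpScan, if_neg hx]
        rw [hrec]
        by_cases hall : ∀ p ∈ y :: tl', p < start
        · have hall' : ∀ p ∈ x :: y :: tl', p < start := by
            intro p hp
            rcases List.mem_cons.mp hp with rfl | hp
            · exact hxlt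
            · exact hall p hp
          rw [if_pos hall, if_pos hall']
          simp
          ring
        · have hall' : ¬ ∀ p ∈ x :: y :: tl', p < start :=
            fun hc => hall fun p hp => hc p (List.mem_cons_of_mem _ hp)
          rw [if_neg hall, if_neg hall']
          simp
          ring

-- B's forward pass, once active: take the next `howmany - len taken` elements
theorem fcpTake_active (start howmany : Int) (l : List Int) :
    ∀ taken : List Int,
      fcpTake start howmany taken true l = taken ++ l.take (howmany - taken.length).toNat := by
  induction l with
  | nil => intro taken; simp [fcpTake]
  | cons p rest ih =>
    intro taken
    simp only [fcpTake, Bool.true_or, if_true]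
    by_cases hb : howmany ≤ (taken.length : Int)
    · rw [if_pos hb]
      have : (howmany - taken.length).toNat = 0 := by omega
      simp [this]
    · rw [if_neg hb, ih]
      have h1 : (howmany - ((taken ++ [p]).length : Int)).toNat
          = (howmany - taken.length).toNat - 1 := by
        simp
        omega
      have h2 : (howmany - (taken.length : Int)).toNat
          = ((howmany - (taken.length : Int)).toNat - 1) + 1 := by
        omega
      rw [h1, h2, List.take_succ_cons]
      simp

-- B's forward pass activates exactly at the first element reaching start
theorem fcpTake_inactive (start howmany : Int) (l : List Int) :
    ∀ taken : List Int,
      fcpTake start howmany taken false l =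
        fcpTake start howmany taken true (l.dropWhile (fun p => decide (p < start))) := by
  induction l with
  | nil => intro taken; simp [fcpTake]
  | cons p rest ih =>
    intro taken
    by_cases hp : start ≤ p
    · rw [List.dropWhile_cons_of_neg (by simp; omega)]
      simp only [fcpTake, Bool.false_or, hp, decide_true, if_true, Bool.true_or]
    · rw [List.dropWhile_cons_of_pos (by simp; omega)]
      simp only [fcpTake, Bool.false_or, show decide (start ≤ p) = false by simp; omega,
        if_false, Bool.false_eq_true]
      exact ih taken

-- B's backward pass keeps exactly the last `howmany` elements seen before the first match
theorem fcpWindow_eq (start howmany : Int) (h0 : 0 ≤ howmany) (l : List Int) :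
    ∀ (window : List Int) (lo : Nat), lo ≤ window.length →
      (window.length : Int) - lo ≤ howmany →
      fcpWindow start howmany window lo l =
        lastN howmany.toNat (window.drop lo ++ l.takeWhile (fun p => decide (p < start))) := by
  induction l with
  | nil =>
    intro window lo hlo hw
    simp only [fcpWindow, List.takeWhile_nil, List.append_nil,
      PySem.List.slice_from_natCast, lastN]
    have : (window.drop lo).length - howmany.toNat = 0 := by
      have := List.length_drop (l := window) (i := lo)
      omega
    simp
    omega
  | cons p rest ih =>
    intro window lo hlo hw
    by_cases hp : start ≤ p
    · rw [List.takeWhile_cons_of_neg (by simp; omega)]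
      simp only [fcpWindow, if_pos hp, PySem.List.slice_from_natCast, List.append_nil, lastN]
      have : (window.drop lo).length - howmany.toNat = 0 := by
        have := List.length_drop (l := window) (i := lo)
        omega
      simp
      omega
    · rw [List.takeWhile_cons_of_pos (by simp; omega)]
      simp only [fcpWindow, if_neg hp]
      by_cases hc : howmany < ((window ++ [p]).length : Int) - (lo : Int)
      · rw [if_pos hc]
        have hlen : (window.length : Int) - lo = howmany := by simp at hc; omega
        rw [ih (window ++ [p]) (lo + 1) (by simp; omega) (by simp; omega)]
        by_cases hz : howmany = 0
        · subst hz
          simp [lastN_zero]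
        · have hlt : lo + 1 ≤ window.length := by omega
          rw [List.drop_append_of_le_length hlt]
          have hne : window.drop lo ≠ [] := by
            intro hcon
            have := congrArg List.length hcon
            simp at this
            omega
          obtain ⟨a, as, has⟩ := List.exists_cons_of_ne_nil hne
          have htail : window.drop (lo + 1) = as := by
            have ht : (window.drop lo).tail = window.drop (lo + 1) := by
              rw [List.tail_drop]
            rw [has] at ht
            simpa using ht.symm
          have hlen2 : as.length + 1 = window.length - lo := by
            have := congrArg List.length has
            simp at this
            omega
          rw [htail, has, List.cons_append, lastN_cons]
          · simp
          · simp
            omega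
      · rw [if_neg hc]
        rw [ih (window ++ [p]) lo (by simp; omega) (by simp at hc ⊢; omega)]
        rw [List.drop_append_of_le_length hlo]
        simp

-- a constant run loses the same list dropping its last as dropping its first element …
theorem constRun_dropLast (l : List Int) (h : l.Pairwise (· = ·)) : l.dropLast = l.drop 1 := by
  induction l with
  | nil => rfl
  | cons a tl ih =>
    rw [List.pairwise_cons] at h
    cases tl with
    | nil => rfl
    | cons b tl' =>
      have htl := ih h.2
      simp only [List.dropLast_cons₂, htl, List.drop_succ_cons, List.drop_zero, List.drop_one]
      rw [h.1 b (by simp)]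

-- … and only a constant run does
theorem dropLast_constRun (l : List Int) (h : l.dropLast = l.drop 1) : l.Pairwise (· = ·) := by
  induction l with
  | nil => exact List.Pairwise.nil
  | cons a tl ih =>
    cases tl with
    | nil => simp
    | cons b tl' =>
      simp only [List.dropLast_cons₂, List.drop_succ_cons, List.drop_zero] at h
      have hab : a = b := by
        have := congrArg (fun l => l[0]?) h
        simpa using this
      have htl : (b :: tl').dropLast = (b :: tl').drop 1 := by
        have := congrArg List.tail h
        simpa [List.drop_one] using this
      have hp := ih htl
      rw [List.pairwise_cons] at ⊢
      refine ⟨?_, hp⟩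
      rw [List.pairwise_cons] at hp
      intro x hx
      rcases List.mem_cons.mp hx with rfl | hx'
      · exact hab
      · exact hab.trans (hp.1 x hx')

-- B's backward pass with a negative count keeps nothing
theorem fcpWindow_neg (start howmany : Int) (hneg : howmany < 0) (l : List Int) :
    ∀ (window : List Int) (lo : Nat), lo = window.length →
      fcpWindow start howmany window lo l = [] := by
  induction l with
  | nil =>
    intro window lo hlo
    simp [fcpWindow, PySem.List.slice_from_natCast, hlo]
  | cons p rest ih =>
    intro window lo hlo
    by_cases hp : start ≤ p
    · simp [fcpWindow, hp, PySem.List.slice_from_natCast, hlo]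
    · unfold fcpWindow
      rw [if_neg hp]
      show fcpWindow start howmany (window ++ [p])
          (if howmany < ((window ++ [p]).length : Int) - (lo : Int) then lo + 1 else lo) rest = []
      rw [if_pos (show howmany < ((window ++ [p]).length : Int) - (lo : Int) by simp; omega)]
      exact ih (window ++ [p]) (lo + 1) (by simp [hlo])

-- A's value when no position reaches start: slices anchored at the LAST index (leftover i)
theorem a_noMatch (positions : List Int) (howmany start direction : Int)
    (hne : positions ≠ []) (hpre : 0 ≤ howmany) (hall : ∀ p ∈ positions, p < start) :
    findCandidatePositions positions howmany start direction =
      if direction = 1 then (positions.drop (positions.length - 1)).take howmany.toNat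
      else (positions.drop (positions.length - 1 - howmany.toNat)).take
        ((positions.length - 1) - (positions.length - 1 - howmany.toNat)) := by
  have hnlen : 1 ≤ positions.length := List.length_pos_of_ne_nil hne
  unfold findCandidatePositions
  rw [if_neg hne, fcpScan_eq start positions 0 0 hne, if_pos hall]
  by_cases hdir : direction = 1
  · rw [if_pos hdir, if_pos hdir]
    rw [PySem.List.slice_toNat positions (by omega) (by omega)]
    have e2 : ((0 : Int) + positions.length - 1 + howmany).toNat
        - ((0 : Int) + positions.length - 1).toNat = howmany.toNat := by omega
    have e1 : ((0 : Int) + positions.length - 1).toNat = positions.length - 1 := by omega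
    rw [e2, e1]
  · rw [if_neg hdir, if_neg hdir]
    show PySem.List.slice positions (some (max ((0 : Int) + positions.length - 1 - howmany) 0))
        (some ((0 : Int) + positions.length - 1)) = _
    rw [PySem.List.slice_toNat positions (by omega) (by omega)]
    have e1 : (max ((0 : Int) + positions.length - 1 - howmany) 0).toNat
        = positions.length - 1 - howmany.toNat := by omega
    have e2 : ((0 : Int) + positions.length - 1).toNat
        - (max ((0 : Int) + positions.length - 1 - howmany) 0).toNat
        = (positions.length - 1) - (positions.length - 1 - howmany.toNat) := by omega
    rw [e2, e1]

-- B's value when no position reaches start: nothing forward, the last howmany backward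
theorem b_noMatch (positions : List Int) (howmany start direction : Int)
    (hpre : 0 ≤ howmany) (hall : ∀ p ∈ positions, p < start) :
    findCandidatePositions_alt positions howmany start direction =
      if direction = 1 then [] else positions.drop (positions.length - howmany.toNat) := by
  unfold findCandidatePositions_alt
  have hdw : positions.dropWhile (fun p => decide (p < start)) = [] := by
    rw [List.dropWhile_eq_nil_iff]
    intro x hx
    simpa using hall x hx
  have htw : positions.takeWhile (fun p => decide (p < start)) = positions := by
    rw [List.takeWhile_eq_self_iff]
    intro x hx
    simpa using hall x hx
  by_cases hdir : direction = 1
  · rw [if_pos hdir, if_pos hdir, fcpTake_inactive, hdw]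
    simp [fcpTake]
  · rw [if_neg hdir, if_neg hdir,
      fcpWindow_eq start howmany hpre positions [] 0 (by simp) (by simpa using hpre)]
    simp [lastN, htw]

-- ===== VERDICT (by name: the statement is the Claim_ definition above) =====
theorem findCandidatePositions_spec : Claim_unchanged_findCandidatePositions := by
  intro positions howmany start direction _ hpre0 hnd
  by_cases hpre : 0 ≤ howmany
  swap
  · have hdir : direction ≠ 1 := by
      rcases hpre0 with h | h
      · exact absurd h hpre
      · exact h
    by_cases hne : positions = []
    · subst hne
      simp [findCandidatePositions, findCandidatePositions_alt, hdir, fcpWindow,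
        PySem.List.slice_from_natCast]
    · unfold findCandidatePositions findCandidatePositions_alt
      rw [if_neg hne, if_neg hdir, if_neg hdir,
        fcpWindow_neg start howmany (by omega) positions [] 0 rfl]
      have hi : 0 ≤ fcpScan start 0 (PySem.List.enumerate positions 0) := by
        rw [fcpScan_eq start positions 0 0 hne]
        have : 1 ≤ positions.length := List.length_pos_of_ne_nil hne
        split <;> omega
      show PySem.List.slice positions
        (some (max (fcpScan start 0 (PySem.List.enumerate positions 0) - howmany) 0))
        (some (fcpScan start 0 (PySem.List.enumerate positions 0))) = []
      rw [PySem.List.slice_toNat positions (by omega) (by omega)]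
      have h0 : (fcpScan start 0 (PySem.List.enumerate positions 0)).toNat
          - (max (fcpScan start 0 (PySem.List.enumerate positions 0) - howmany) 0).toNat = 0 := by
        omega
      rw [h0]
      simp
  by_cases hne : positions = []
  · subst hne
    by_cases hdir : direction = 1
    · simp [findCandidatePositions, findCandidatePositions_alt, hdir, fcpTake]
    · simp [findCandidatePositions, findCandidatePositions_alt, hdir, fcpWindow,
        PySem.List.slice_from_natCast]
  · have hnlen : 1 ≤ positions.length := List.length_pos_of_ne_nil hne
    by_cases hall : ∀ p ∈ positions, p < start
    · rw [a_noMatch positions howmany start direction hne hpre hall,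
        b_noMatch positions howmany start direction hpre hall]
      by_cases h1 : 1 ≤ howmany
      · have hdisj : direction ≠ 1 ∧ ¬ ((positions.length : Int) ≤ howmany) ∧
            (positions.drop (positions.length - 1 - howmany.toNat)).Pairwise (· = ·) := by
          by_contra hc
          apply hnd
          refine ⟨hne, h1, hall, ?_⟩
          tauto
        obtain ⟨hdir, hlt, hcr⟩ := hdisj
        rw [if_neg hdir, if_neg hdir]
        have htake : (positions.length - 1) - (positions.length - 1 - howmany.toNat)
            = howmany.toNat := by omega
        rw [htake]
        set t := positions.drop (positions.length - 1 - howmany.toNat) with ht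
        have hlenT : t.length = howmany.toNat + 1 := by
          rw [ht, List.length_drop]
          omega
        have h2 : t.take howmany.toNat = t.dropLast := by
          rw [List.dropLast_eq_take, hlenT]
          simp
        rw [h2, constRun_dropLast t hcr, ht, List.drop_drop]
        congr 1
        omega
      · have h0 : howmany = 0 := by omega
        subst h0
        split
        · simp
        · simp [List.drop_length]
    · unfold findCandidatePositions findCandidatePositions_alt
      rw [if_neg hne, fcpScan_eq start positions 0 0 hne, if_neg hall]
      have hsplit : positions.takeWhile (fun p => decide (p < start))
          ++ positions.dropWhile (fun p => decide (p < start)) = positions :=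
        List.takeWhile_append_dropWhile
      set k := (positions.takeWhile (fun p => decide (p < start))).length with hk
      by_cases hdir : direction = 1
      · rw [if_pos hdir, if_pos hdir]
        rw [fcpTake_inactive, fcpTake_active]
        rw [PySem.List.slice_toNat positions (by omega) (by omega)]
        have e2 : ((0 : Int) + k + howmany).toNat - ((0 : Int) + k).toNat = howmany.toNat := by
          omega
        have e1 : ((0 : Int) + k).toNat = k := by omega
        rw [e2, e1]
        have hdropk : positions.drop k = positions.dropWhile (fun p => decide (p < start)) := by
          conv_lhs => rw [← hsplit]
          rw [hk]
          exact List.drop_left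
        rw [hdropk]
        simp
      · rw [if_neg hdir, if_neg hdir]
        rw [fcpWindow_eq start howmany hpre positions [] 0 (by simp) (by simpa using hpre)]
        simp only [List.drop_nil, List.nil_append]
        show PySem.List.slice positions (some (max ((0 : Int) + k - howmany) 0))
            (some ((0 : Int) + k)) = _
        rw [PySem.List.slice_toNat positions (by omega) (by omega)]
        have e1 : (max ((0 : Int) + k - howmany) 0).toNat = k - howmany.toNat := by omega
        have e2 : ((0 : Int) + k).toNat - (max ((0 : Int) + k - howmany) 0).toNat
            = k - (k - howmany.toNat) := by omega
        rw [e2, e1]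
        have hdropk : positions.drop (k - howmany.toNat)
            = (positions.takeWhile (fun p => decide (p < start))).drop (k - howmany.toNat)
              ++ positions.dropWhile (fun p => decide (p < start)) := by
          conv_lhs => rw [← hsplit]
          rw [List.drop_append_of_le_length (by omega)]
        rw [hdropk, List.take_left' (by simp [hk])]
        rfl

theorem findCandidatePositions_changed : Claim_changed_findCandidatePositions := by
  unfold Claim_changed_findCandidatePositions
  decide

theorem findCandidatePositions_tight : Claim_exact_findCandidatePositions := by
  intro positions howmany start direction _ hpre0 hD
  obtain ⟨hne, h1, hall, hdisj⟩ := hD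
  have hpre : 0 ≤ howmany := by omega
  have hnlen : 1 ≤ positions.length := List.length_pos_of_ne_nil hne
  rw [a_noMatch positions howmany start direction hne hpre hall,
    b_noMatch positions howmany start direction hpre hall]
  by_cases hdir : direction = 1
  · rw [if_pos hdir, if_pos hdir]
    intro hcon
    have := congrArg List.length hcon
    simp at this
    omega
  · rw [if_neg hdir, if_neg hdir]
    by_cases hbig : (positions.length : Int) ≤ howmany
    · intro hcon
      have := congrArg List.length hcon
      simp at this
      omega
    · have hcr : ¬ (positions.drop (positions.length - 1 - howmany.toNat)).Pairwise (· = ·) := by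
        rcases hdisj with h | h | h
        · exact absurd h hdir
        · exact absurd h hbig
        · exact h
      intro hcon
      apply hcr
      apply dropLast_constRun
      set t := positions.drop (positions.length - 1 - howmany.toNat) with ht
      have hlenT : t.length = howmany.toNat + 1 := by
        rw [ht, List.length_drop]
        omega
      have htake : (positions.length - 1) - (positions.length - 1 - howmany.toNat)
          = howmany.toNat := by omega
      rw [htake] at hcon
      have hdrop1 : t.drop 1 = positions.drop (positions.length - howmany.toNat) := by
        rw [ht, List.drop_drop]
        congr 1
        omega
      rw [List.dropLast_eq_take, hlenT]
      simpa [hdrop1] using hcon
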